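-- pv_equiv track=rewrite | github.com/Vaibhav303kumar/Coding-Ninja-DSA_with_Python | Recursion Assignment/Check AB.py | check
-- ===== SOURCE A (Python) =====
-- def check(s,i,l):
--     if l==1 :
--         if s[0]!="a" :
--             return "false"
--         else:
--             return "true"
--
--     if i==(l-2):
--         return "true"
--     if s[0]!="a":
--         return "false"
--     if s[i]=='a':
--         if s[i:i+3]!="abb" and s[i:i+2]!="aa":
--             return "false"
--     if s[i]=="b":
--         if s[i:i+3]!="bba" and s[i:i+2]!="ba":
--             return "false"
--     i+=1
--     return check(s,i,l)
-- ===== SOURCE B (Python) =====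
-- def _bad(s, j):
--     if s[j] == "a":
--         return s[j:j+3] != "abb" and s[j:j+2] != "aa"
--     if s[j] == "b":
--         return s[j:j+3] != "bba" and s[j:j+2] != "ba"
--     return False
--
--
-- def check(s, i, l):
--     if l == 1:
--         return "true" if s[0] == "a" else "false"
--     if i == l - 2:
--         return "true"
--     if s[0] != "a":
--         return "false"
--     for j in range(i, l - 2):
--         if _bad(s, j):
--             return "false"
--     return "true"
-- ===== Notes on version B (the rewrite author's own statement) =====
-- stated objective: simpler
-- what changed: A's unbounded tail recursion (re-testing l==1 and s[0] every step and scanning until it happens to hit i==l-2) is replaced by a guard chain plus one bounded for-loop over range(i, l-2) with a small window-check helper _bad.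
-- intended difference: On inputs with the start index already past the last checking position (i > l-2, never reached from the intended call check(s,0,len(s))) and s starting with 'a', A keeps scanning beyond the checking region and returns 'false' whenever a later window fails, while B returns 'true' for the empty checking range, the intended value. — e.g. on check("ab", 0, 0): A returns "false", B returns "true"
import Mathlib
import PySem

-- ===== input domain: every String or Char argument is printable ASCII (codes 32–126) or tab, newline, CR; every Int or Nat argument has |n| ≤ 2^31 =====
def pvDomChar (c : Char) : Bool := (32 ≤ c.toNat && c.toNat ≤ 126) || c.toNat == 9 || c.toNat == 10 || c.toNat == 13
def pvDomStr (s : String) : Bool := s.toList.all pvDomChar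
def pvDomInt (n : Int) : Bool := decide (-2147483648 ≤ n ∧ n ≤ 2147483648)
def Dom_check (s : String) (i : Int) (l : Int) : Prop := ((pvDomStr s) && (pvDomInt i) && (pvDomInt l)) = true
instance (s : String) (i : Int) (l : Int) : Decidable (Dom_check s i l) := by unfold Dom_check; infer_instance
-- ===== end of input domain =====

-- B replaces A's unbounded tail recursion by a guard chain plus one bounded for-loop over
-- range(i, l-2) with a small window-check helper (simpler; return value only, no side effects).

-- ===== PORT A =====
-- A's recursion, made total with fuel; under Pre_check the fuel (one step per scanned index,
-- bounded by max(l-2, len(s)) + 1 - i) never runs out, so the fuel-0 default is unreachable there.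
def checkAux : Nat → List Char → Int → Int → String
  | 0, _, _, _ => ""
  | f + 1, cs, i, l =>
    if l = 1 then
      if PySem.List.pyGet? cs 0 ≠ some 'a' then "false" else "true"
    else if i = l - 2 then "true"
    else if PySem.List.pyGet? cs 0 ≠ some 'a' then "false"
    else if PySem.List.pyGet? cs i = some 'a' ∧
            PySem.List.slice cs (some i) (some (i + 3)) ≠ ['a', 'b', 'b'] ∧
            PySem.List.slice cs (some i) (some (i + 2)) ≠ ['a', 'a'] then "false"
    else if PySem.List.pyGet? cs i = some 'b' ∧
            PySem.List.slice cs (some i) (some (i + 3)) ≠ ['b', 'b', 'a'] ∧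
            PySem.List.slice cs (some i) (some (i + 2)) ≠ ['b', 'a'] then "false"
    else checkAux f cs (i + 1) l

def check (s : String) (i : Int) (l : Int) : String :=
  checkAux ((max (l - 2) (s.toList.length : Int) + 1 - i).toNat + 1) s.toList i l

-- ===== PORT B =====
-- Source B's helper _bad(s, j): does the window at j rule the string out?
def pvBad (cs : List Char) (j : Int) : Bool :=
  if PySem.List.pyGet? cs j = some 'a' then
    (PySem.List.slice cs (some j) (some (j + 3)) != ['a', 'b', 'b']) &&
    (PySem.List.slice cs (some j) (some (j + 2)) != ['a', 'a'])
  else if PySem.List.pyGet? cs j = some 'b' then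
    (PySem.List.slice cs (some j) (some (j + 3)) != ['b', 'b', 'a']) &&
    (PySem.List.slice cs (some j) (some (j + 2)) != ['b', 'a'])
  else false

-- Source B's for-loop body: structural recursion on the list of indices range(i, l-2)
def loopB (cs : List Char) : List Int → String
  | [] => "true"
  | j :: rest => if pvBad cs j then "false" else loopB cs rest

def check_alt (s : String) (i : Int) (l : Int) : String :=
  if l = 1 then
    if PySem.List.pyGet? s.toList 0 = some 'a' then "true" else "false"
  else if i = l - 2 then "true"
  else if PySem.List.pyGet? s.toList 0 ≠ some 'a' then "false"
  else loopB s.toList (PySem.List.pyRange i (l - 2) 1)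

-- ===== PRECONDITION & SPEC =====
-- pvFails cs j: the window at index j is decisive ("false"); a condition on the input only
-- (not used by either port).
def pvFails (cs : List Char) (j : Int) : Prop :=
  (PySem.List.pyGet? cs j = some 'a' ∧
     PySem.List.slice cs (some j) (some (j + 3)) ≠ ['a', 'b', 'b'] ∧
     PySem.List.slice cs (some j) (some (j + 2)) ≠ ['a', 'a']) ∨
  (PySem.List.pyGet? cs j = some 'b' ∧
     PySem.List.slice cs (some j) (some (j + 3)) ≠ ['b', 'b', 'a'] ∧
     PySem.List.slice cs (some j) (some (j + 2)) ≠ ['b', 'a'])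

-- Pre_check holds exactly when Python A returns normally: nothing A returns on is excluded.
-- A raises IndexError iff it reads s[0] of an empty string, or its scan from i runs onto an
-- out-of-range index before meeting either i == l-2 or a decisive window; Pre_check demands a
-- stopping index j ≥ i (j = l-2 or a decisive window at j) with every index before it in range
-- (such a j always lies in [i, len(s)], so the search range is bounded by the string).
def Pre_check (s : String) (i : Int) (l : Int) : Prop :=
  if l = 1 then 1 ≤ (s.toList.length : Int)
  else
    i = l - 2 ∨
      (1 ≤ (s.toList.length : Int) ∧
        (PySem.List.pyGet? s.toList 0 ≠ some 'a' ∨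
          (-(s.toList.length : Int) ≤ i ∧
            ∃ j ∈ PySem.List.pyRange i ((s.toList.length : Int) + 1) 1,
              (j = l - 2 ∨ pvFails s.toList j) ∧
              ∀ k ∈ PySem.List.pyRange i j 1, (PySem.List.pyGet? s.toList k).isSome = true)))
instance (s : String) (i : Int) (l : Int) : Decidable (Pre_check s i l) := by
  unfold Pre_check pvFails; infer_instance

def pvWitness_check : String × Int × Int := ("ab", 0, 2)

-- On inputs whose start index is already past the last checking position (i > l-2, never reached
-- from the intended top-level call check(s, 0, len(s))) with s starting in 'a', A keeps scanning
-- the string beyond the checking region and returns "false" whenever some later window fails,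
-- while B returns "true" for the empty checking range, the intended value.
def D_check (s : String) (i : Int) (l : Int) : Prop :=
  l ≠ 1 ∧ l - 2 < i ∧ PySem.List.pyGet? s.toList 0 = some 'a'
instance (s : String) (i : Int) (l : Int) : Decidable (D_check s i l) := by
  unfold D_check; infer_instance

def Spec_check (s : String) (i : Int) (l : Int) (out : String) : Prop :=
  ¬ D_check s i l → out = check_alt s i l
instance (s : String) (i : Int) (l : Int) (out : String) : Decidable (Spec_check s i l out) := by
  unfold Spec_check; infer_instance

def pvDiffWitness_check : String × Int × Int := ("ab", 0, 0)
def pvDiffWitnessOut_check : String × String := ("false", "true")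

-- ===== CLAIM (what is proved, stated in full; the proofs are below) =====
def Claim_unchanged_check : Prop :=
  ∀ (s : String) (i : Int) (l : Int), Dom_check s i l → Pre_check s i l →
    Spec_check s i l (check s i l)

def Claim_changed_check : Prop :=
  Dom_check (pvDiffWitness_check.1) (pvDiffWitness_check.2.1) (pvDiffWitness_check.2.2) ∧
  Pre_check (pvDiffWitness_check.1) (pvDiffWitness_check.2.1) (pvDiffWitness_check.2.2) ∧
  D_check (pvDiffWitness_check.1) (pvDiffWitness_check.2.1) (pvDiffWitness_check.2.2) ∧
  check (pvDiffWitness_check.1) (pvDiffWitness_check.2.1) (pvDiffWitness_check.2.2) = pvDiffWitnessOut_check.1 ∧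
  check_alt (pvDiffWitness_check.1) (pvDiffWitness_check.2.1) (pvDiffWitness_check.2.2) = pvDiffWitnessOut_check.2 ∧
  pvDiffWitnessOut_check.1 ≠ pvDiffWitnessOut_check.2

def Claim_exact_check : Prop :=
  ∀ (s : String) (i : Int) (l : Int), Dom_check s i l → Pre_check s i l → D_check s i l →
    check s i l ≠ check_alt s i l

-- ===== LEMMAS AND PROOFS =====
lemma pvBad_true_iff (cs : List Char) (j : Int) : pvBad cs j = true ↔ pvFails cs j := by
  unfold pvBad pvFails
  split_ifs with h1 h2 <;> simp [*]

-- the scanned region agrees: for i ≤ l-2 both programs fail at the first decisive window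
-- in [i, l-2) and return "true" if there is none
lemma scan_eq (f : Nat) :
    ∀ (cs : List Char) (i l : Int), l ≠ 1 → i ≤ l - 2 →
      PySem.List.pyGet? cs 0 = some 'a' → (l - 2 - i).toNat < f →
      checkAux f cs i l = loopB cs (PySem.List.pyRange i (l - 2) 1) := by
  induction f with
  | zero => intro cs i l _ _ _ hf; omega
  | succ f ih =>
    intro cs i l hl hi h0 hf
    simp only [checkAux]
    rw [if_neg hl]
    by_cases hi2 : i = l - 2
    · rw [if_pos hi2, PySem.List.pyRange_one_eq_nil (by omega)]
      rfl
    · rw [if_neg hi2, if_neg (by simp [h0]),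
          PySem.List.pyRange_one_cons (by omega)]
      simp only [loopB]
      by_cases hb : pvBad cs i = true
      · rw [if_pos hb]
        rcases (pvBad_true_iff cs i).mp hb with h | h
        · rw [if_pos h]
        · rw [if_neg (by rintro ⟨ha, -⟩; rw [h.1] at ha; exact (by decide : ¬ (some 'b' = some 'a')) ha),
              if_pos h]
      · rw [if_neg hb,
            if_neg (fun h => hb ((pvBad_true_iff cs i).mpr (Or.inl h))),
            if_neg (fun h => hb ((pvBad_true_iff cs i).mpr (Or.inr h)))]
        exact ih cs (i + 1) l hl (by omega) h0 (by omega)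

-- inside D_: if some window at j ≥ i is decisive and i is already past l-2, A's scan ends in "false"
lemma scan_false (f : Nat) :
    ∀ (cs : List Char) (i l j : Int), l ≠ 1 → l - 2 < i → i ≤ j →
      PySem.List.pyGet? cs 0 = some 'a' → pvFails cs j → (j - i).toNat < f →
      checkAux f cs i l = "false" := by
  induction f with
  | zero => intro cs i l j _ _ _ _ _ hf; omega
  | succ f ih =>
    intro cs i l j hl hgt hij h0 hfail hf
    simp only [checkAux]
    rw [if_neg hl, if_neg (by omega), if_neg (by simp [h0])]
    by_cases hb : pvBad cs i = true
    · rcases (pvBad_true_iff cs i).mp hb with h | h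
      · rw [if_pos h]
      · rw [if_neg (by rintro ⟨ha, -⟩; rw [h.1] at ha; exact (by decide : ¬ (some 'b' = some 'a')) ha),
            if_pos h]
    · have hij' : i ≠ j := by
        rintro rfl
        exact hb ((pvBad_true_iff cs i).mpr hfail)
      rw [if_neg (fun h => hb ((pvBad_true_iff cs i).mpr (Or.inl h))),
          if_neg (fun h => hb ((pvBad_true_iff cs i).mpr (Or.inr h)))]
      exact ih cs (i + 1) l j hl (by omega) (by omega) h0 hfail (by omega)

-- ===== VERDICT (by name: the statements are the Claim_ definitions above) =====
theorem check_spec : Claim_unchanged_check := by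
  intro s i l _ hpre
  unfold Spec_check
  intro hnd
  unfold check check_alt
  by_cases hl : l = 1
  · subst hl
    simp only [checkAux]
    by_cases h0 : PySem.List.pyGet? s.toList 0 = some 'a'
    · simp [h0]
    · simp [h0]
  · by_cases hi : i = l - 2
    · simp only [checkAux]
      rw [if_neg hl, if_pos hi, if_neg hl, if_pos hi]
    · by_cases h0 : PySem.List.pyGet? s.toList 0 = some 'a'
      · have hle : i ≤ l - 2 := by
          by_contra hgt
          exact hnd ⟨hl, by omega, h0⟩
        rw [if_neg hl, if_neg hi, if_neg (by simp [h0])]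
        refine scan_eq _ s.toList i l hl hle h0 ?_
        have := le_max_left (l - 2) ((s.toList.length : Int))
        omega
      · simp only [checkAux]
        rw [if_neg hl, if_neg hi, if_pos h0, if_neg hl, if_neg hi, if_pos h0]

theorem check_changed : Claim_changed_check := by
  unfold Claim_changed_check; decide

theorem check_tight : Claim_exact_check := by
  intro s i l _ hpre hd
  obtain ⟨hl, hgt, h0⟩ := hd
  unfold Pre_check at hpre
  rw [if_neg hl] at hpre
  rcases hpre with hi | ⟨-, hcase⟩
  · omega
  · rcases hcase with hne | ⟨-, j, hjmem, hev, -⟩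
    · exact absurd h0 hne
    · have hj := (PySem.List.mem_pyRange_one).mp hjmem
      have hfail : pvFails s.toList j := by
        rcases hev with rfl | h
        · omega
        · exact h
      have hA : check s i l = "false" := by
        unfold check
        refine scan_false _ s.toList i l j hl hgt hj.1 h0 hfail ?_
        have := le_max_right (l - 2) ((s.toList.length : Int))
        omega
      have hB : check_alt s i l = "true" := by
        unfold check_alt
        rw [if_neg hl, if_neg (by omega), if_neg (by simp [h0]),
            PySem.List.pyRange_one_eq_nil (by omega)]
        rfl
      rw [hA, hB]
      decide
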